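-- pv_equiv track=rewrite | github.com/adriaanm/bq268-fhprg | tools/split_fhprg.py | assign_modules
-- ===== SOURCE A (Python) =====
-- THUNK_START = 0x00220000
--
-- THUNK_END   = 0x00230000
--
-- MAX_UNTAGGED_RUN = 8
--
-- def _make_addr_module(addr):
--     """Generate a module name for an untagged region starting at addr."""
--     return f"fhprg_{addr:04x}"
--
-- def assign_modules(functions):
--     """Assign each function to a module using filename clustering.
--
--     Algorithm:
--       1. Separate thunks (0x002xxxxx) into their own module.
--       2. Sort remaining functions by address.
--       3. Walk the sorted list.  When a function has a known source filename,
--          set that as the "current" module.  Untagged functions inherit the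
--          current module — unless there are more than MAX_UNTAGGED_RUN
--          consecutive untagged functions, in which case they become their
--          own "fhprg_XXXX" module.
--     """
--     thunks = []
--     main_funcs = []
--
--     for addr, name, lines, src in functions:
--         if THUNK_START <= addr < THUNK_END:
--             thunks.append((addr, name, lines, src))
--         else:
--             main_funcs.append((addr, name, lines, src))
--
--     main_funcs.sort(key=lambda x: x[0])
--
--     # Build raw tag list: index -> source_file or None
--     raw_tags = [src.replace('.c', '') if src else None for _, _, _, src in main_funcs]
--
--     # Pass 1: identify tagged anchors and measure untagged gaps between them
--     # An "anchor" is any index where raw_tags[i] is not None.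
--     anchors = [i for i, t in enumerate(raw_tags) if t is not None]
--
--     assignments = [None] * len(main_funcs)
--
--     # Tag anchors themselves
--     for i in anchors:
--         assignments[i] = raw_tags[i]
--
--     # Fill gaps between consecutive anchors
--     # For each pair (prev_anchor, next_anchor), the gap is the indices between them.
--     # A gap before the first anchor or after the last anchor is treated as edge.
--     boundaries = [-1] + anchors + [len(main_funcs)]
--
--     for b in range(len(boundaries) - 1):
--         start = boundaries[b] + 1
--         end = boundaries[b + 1]  # exclusive (or anchor index)
--
--         if start >= end:
--             continue  # no gap
--
--         gap_len = end - start
--         if gap_len <= MAX_UNTAGGED_RUN: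
--             # Small gap: assign to the nearest anchor
--             if b > 0 and boundaries[b] >= 0:
--                 # Prefer preceding anchor
--                 tag = assignments[boundaries[b]]
--             elif end < len(main_funcs) and assignments[end] is not None:
--                 # Use following anchor (leading edge)
--                 tag = assignments[end]
--             else:
--                 tag = _make_addr_module(main_funcs[start][0])
--             for i in range(start, end):
--                 assignments[i] = tag
--         else:
--             # Large gap: make a new module named by start address
--             tag = _make_addr_module(main_funcs[start][0])
--             for i in range(start, end):
--                 assignments[i] = tag
--
--     # Any remaining None (shouldn't happen) gets a fallback
--     for i in range(len(assignments)):
--         if assignments[i] is None: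
--             assignments[i] = _make_addr_module(main_funcs[i][0])
--
--     # Build module dict
--     modules = {}
--     if thunks:
--         modules["thunks"] = [(a, n, l) for a, n, l, _ in thunks]
--
--     for i, (addr, name, lines, _) in enumerate(main_funcs):
--         mod = assignments[i]
--         modules.setdefault(mod, []).append((addr, name, lines))
--
--     return modules
-- ===== SOURCE B (Python) =====
-- THUNK_START = 0x00220000
--
-- THUNK_END   = 0x00230000
--
-- MAX_UNTAGGED_RUN = 8
--
-- def _make_addr_module(addr):
--     """Generate a module name for an untagged region starting at addr."""
--     return f"fhprg_{addr:04x}"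
--
-- def assign_modules(functions):
--     """Single-pass clustering: walk the sorted non-thunk functions keeping the
--     current tag and a buffer of consecutive untagged entries, flushing the
--     buffer whenever a tagged function (or the end) is reached."""
--     thunks = [f for f in functions if THUNK_START <= f[0] < THUNK_END]
--     main_funcs = sorted(
--         (f for f in functions if not (THUNK_START <= f[0] < THUNK_END)),
--         key=lambda f: f[0],
--     )
--
--     modules = {}
--     if thunks:
--         modules["thunks"] = [(a, n, l) for a, n, l, _ in thunks]
--
--     def emit(tag, entries):
--         modules.setdefault(tag, []).extend((a, n, l) for a, n, l, _ in entries)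
--
--     cur = None   # tag of the most recently seen tagged function
--     buf = []     # consecutive untagged entries awaiting a module
--
--     def flush(next_tag):
--         nonlocal buf
--         if not buf:
--             return
--         if len(buf) > MAX_UNTAGGED_RUN:
--             tag = _make_addr_module(buf[0][0])
--         elif cur is not None:
--             tag = cur
--         elif next_tag is not None:
--             tag = next_tag
--         else:
--             tag = _make_addr_module(buf[0][0])
--         emit(tag, buf)
--         buf = []
--
--     for entry in main_funcs:
--         src = entry[3]
--         if not src:
--             buf.append(entry)
--         else:
--             t = src.replace('.c', '')
--             flush(t)
--             emit(t, [entry])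
--             cur = t
--     flush(None)
--     return modules
-- ===== Notes on version B (the rewrite author's own statement) =====
-- stated objective: simpler
-- what changed: Replaces A's multi-pass index machinery (raw-tag list, anchor index list, boundary pairs, gap-filling writes into an assignments array, fallback pass, then an enumerate+lookup pass to build the dict) by a single buffered sweep over the sorted functions that flushes each untagged run straight into the module dict.
import Mathlib
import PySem

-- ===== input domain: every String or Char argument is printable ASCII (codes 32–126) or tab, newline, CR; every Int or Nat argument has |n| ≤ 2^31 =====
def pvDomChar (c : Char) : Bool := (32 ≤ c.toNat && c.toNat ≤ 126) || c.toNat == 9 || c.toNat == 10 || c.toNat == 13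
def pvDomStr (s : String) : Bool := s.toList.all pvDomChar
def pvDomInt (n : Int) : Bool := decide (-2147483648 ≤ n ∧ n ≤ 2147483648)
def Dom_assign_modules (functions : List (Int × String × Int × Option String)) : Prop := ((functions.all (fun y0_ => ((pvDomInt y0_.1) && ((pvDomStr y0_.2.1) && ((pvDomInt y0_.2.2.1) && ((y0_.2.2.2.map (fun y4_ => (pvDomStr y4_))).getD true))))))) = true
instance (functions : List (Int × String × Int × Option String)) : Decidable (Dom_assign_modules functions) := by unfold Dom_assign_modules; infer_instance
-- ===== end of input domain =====

-- B is a simpler single buffered sweep over the sorted functions (same return value as A;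
-- neither implementation mutates its argument observably: Python A sorts a freshly built list).

-- Shared module-level constants and helpers (used verbatim by both Python versions)
def pvTHUNK_START : Int := 0x00220000
def pvTHUNK_END : Int := 0x00230000
def pvMAX_UNTAGGED_RUN : Int := 8

-- f"fhprg_{addr:04x}" : signed lowercase hex, zero-filled to width 4 (sign kept in front)
def makeAddrModule (addr : Int) : String :=
  "fhprg_" ++ PySem.Str.zfill
    (if addr < 0 then "-" ++ String.ofList (Nat.toDigits 16 (-addr).toNat)
     else String.ofList (Nat.toDigits 16 addr.toNat)) 4

-- Python truthiness of the optional `src` string (None and "" are falsy)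
def pvIsTruthy (o : Option String) : Bool :=
  match o with
  | none => false
  | some s => s != ""

-- `THUNK_START <= addr < THUNK_END` (identical test in both versions)
def pvIsThunk (f : Int × String × Int × Option String) : Bool :=
  decide (pvTHUNK_START ≤ f.1 ∧ f.1 < pvTHUNK_END)

-- `(a, n, l) for a, n, l, _ in …`
def pvStrip3 (f : Int × String × Int × Option String) : Int × String × Int :=
  (f.1, f.2.1, f.2.2.1)

-- dummy default for in-range list reads (Python raises IndexError out of range; all reads below are in range)
def pvDummy : Int × String × Int × Option String := (0, "", 0, none)

-- ===== PORT A =====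
def assign_modules (functions : List (Int × String × Int × Option String)) : List (String × List (Int × String × Int)) :=
  -- thunks/main_funcs split loop
  let sp := functions.foldl
    (fun (tm : List (Int × String × Int × Option String) × List (Int × String × Int × Option String)) f =>
      if pvIsThunk f then (tm.1 ++ [f], tm.2) else (tm.1, tm.2 ++ [f])) ([], [])
  let thunks := sp.1
  let main_funcs := PySem.List.sorted sp.2 (fun f => f.1)
  let n : Int := (main_funcs.length : Int)
  -- raw_tags = [src.replace('.c','') if src else None for …]
  let raw_tags : List (Option String) := main_funcs.map (fun f =>
    if pvIsTruthy f.2.2.2 then some (PySem.Str.replace (f.2.2.2.getD "") ".c" "") else none)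
  -- anchors = [i for i, t in enumerate(raw_tags) if t is not None]
  let anchors : List Int := (PySem.List.enumerate raw_tags).foldl
    (fun (acc : List Int) p => if p.2.isSome then acc ++ [p.1] else acc) []
  -- assignments = [None] * len(main_funcs); anchors tagged
  let asg0 : List (Option String) := List.replicate main_funcs.length none
  let asg1 := anchors.foldl
    (fun asg i => PySem.List.pySetD asg i (PySem.List.pyGetD raw_tags i none)) asg0
  let boundaries : List Int := [-1] ++ anchors ++ [n]
  -- gap-filling loop over consecutive boundaries
  let asg2 := (PySem.List.pyRange 0 ((boundaries.length : Int) - 1)).foldl (fun asg b =>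
    let start := PySem.List.pyGetD boundaries b 0 + 1
    let fin := PySem.List.pyGetD boundaries (b + 1) 0
    if start ≥ fin then asg
    else
      let tag : Option String :=
        if fin - start ≤ pvMAX_UNTAGGED_RUN then
          if 0 < b ∧ 0 ≤ PySem.List.pyGetD boundaries b 0 then
            PySem.List.pyGetD asg (PySem.List.pyGetD boundaries b 0) none
          else if fin < n ∧ (PySem.List.pyGetD asg fin none).isSome then
            PySem.List.pyGetD asg fin none
          else some (makeAddrModule (PySem.List.pyGetD main_funcs start pvDummy).1)
        else some (makeAddrModule (PySem.List.pyGetD main_funcs start pvDummy).1)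
      (PySem.List.pyRange start fin).foldl (fun a i => PySem.List.pySetD a i tag) asg) asg1
  -- fallback: any remaining None (unreachable) gets an address module
  let asg3 := (PySem.List.pyRange 0 ((asg2.length : Int))).foldl (fun a i =>
    if PySem.List.pyGetD a i none = none then
      PySem.List.pySetD a i (some (makeAddrModule (PySem.List.pyGetD main_funcs i pvDummy).1))
    else a) asg2
  -- module dict
  let m0 : PySem.Dict String (List (Int × String × Int)) := PySem.Dict.empty
  let m1 := if thunks ≠ [] then m0.insert "thunks" (thunks.map pvStrip3) else m0
  let m2 := (PySem.List.enumerate main_funcs).foldl (fun d p =>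
    match PySem.List.pyGetD asg3 p.1 none with
    | some mname => d.modify mname [] (fun cur => cur ++ [pvStrip3 p.2])
    | none => d) m1    -- None is unreachable: the fallback loop filled every slot
  m2.items

-- ===== PORT B =====
-- tag chosen when flushing a buffered untagged run (Source B's flush; b0 = first buffered entry)
def pvPickTag (cur next_tag : Option String) (b0 : Int × String × Int × Option String) (len : Nat) : String :=
  if (len : Int) > pvMAX_UNTAGGED_RUN then makeAddrModule b0.1
  else
    match cur with
    | some c => c
    | none =>
      match next_tag with
      | some t => t
      | none => makeAddrModule b0.1

-- flush(next_tag): emit the buffered run (no-op on an empty buffer)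
def pvFlush (d : PySem.Dict String (List (Int × String × Int))) (cur : Option String)
    (buf : List (Int × String × Int × Option String)) (next_tag : Option String) :
    PySem.Dict String (List (Int × String × Int)) :=
  match buf with
  | [] => d
  | b0 :: _ => d.modify (pvPickTag cur next_tag b0 buf.length) [] (fun v => v ++ buf.map pvStrip3)

-- the main sweep: cur = most recent tag, buf = pending untagged run
def pvGoB (d : PySem.Dict String (List (Int × String × Int))) (cur : Option String)
    (buf : List (Int × String × Int × Option String)) :
    List (Int × String × Int × Option String) → PySem.Dict String (List (Int × String × Int))
  | [] => pvFlush d cur buf none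
  | e :: rest =>
    if pvIsTruthy e.2.2.2 = false then pvGoB d cur (buf ++ [e]) rest
    else
      let t := PySem.Str.replace (e.2.2.2.getD "") ".c" ""
      let d1 := pvFlush d cur buf (some t)
      let d2 := d1.modify t [] (fun v => v ++ [pvStrip3 e])
      pvGoB d2 (some t) [] rest

def assign_modules_alt (functions : List (Int × String × Int × Option String)) : List (String × List (Int × String × Int)) :=
  let thunks := functions.filter pvIsThunk
  let main_funcs := PySem.List.sorted (functions.filter (fun f => !pvIsThunk f)) (fun f => f.1)
  let m0 : PySem.Dict String (List (Int × String × Int)) :=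
    if thunks ≠ [] then PySem.Dict.empty.insert "thunks" (thunks.map pvStrip3) else PySem.Dict.empty
  (pvGoB m0 none [] main_funcs).items

-- ===== PRECONDITION & SPEC =====
def Spec_assign_modules (functions : List (Int × String × Int × Option String)) (out : List (String × List (Int × String × Int))) : Prop := out = assign_modules_alt functions
instance (functions : List (Int × String × Int × Option String)) (out : List (String × List (Int × String × Int))) : Decidable (Spec_assign_modules functions out) := by unfold Spec_assign_modules; infer_instance

-- ===== CLAIM (what is proved, stated in full; the proofs are below) =====
def Claim_equal_assign_modules : Prop := ∀ (functions : List (Int × String × Int × Option String)), Dom_assign_modules functions → Spec_assign_modules functions (assign_modules functions)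


-- ===== LEMMAS AND PROOFS =====

-- Proof-side abbreviations and specs (used only by the proofs below)
abbrev PVE := Int × String × Int × Option String
abbrev PVDict := PySem.Dict String (List (Int × String × Int))

def pvTagOf (f : PVE) : Option String :=
  if pvIsTruthy f.2.2.2 then some (PySem.Str.replace (f.2.2.2.getD "") ".c" "") else none

-- absolute positions of tagged functions, starting at index m
def pvAbsAnchors (m : Int) : List PVE → List Int
  | [] => []
  | e :: rest => if pvIsTruthy e.2.2.2 then m :: pvAbsAnchors (m + 1) rest else pvAbsAnchors (m + 1) rest

-- the tags an untagged run receives when flushed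
def pvFlushTags (cur nxt : Option String) (buf : List PVE) : List String :=
  match buf with
  | [] => []
  | b0 :: _ => List.replicate buf.length (pvPickTag cur nxt b0 buf.length)

-- the module tag of every entry of the list, in order (common spec of both programs)
def pvSpecAsg (cur : Option String) (buf : List PVE) : List PVE → List String
  | [] => pvFlushTags cur none buf
  | e :: rest =>
    if pvIsTruthy e.2.2.2 = false then pvSpecAsg cur (buf ++ [e]) rest
    else
      let t := PySem.Str.replace (e.2.2.2.getD "") ".c" ""
      pvFlushTags cur (some t) buf ++ t :: pvSpecAsg (some t) [] rest

-- A's gap loop, re-expressed as a recursion over adjacent boundary pairs (with the loop index)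
def pvPairRec {σ : Type} (F : σ → Int → Int → Int → σ) : Int → List Int → σ → σ
  | _, [], a => a
  | _, [_], a => a
  | i, x :: y :: rest, a => pvPairRec F (i + 1) (y :: rest) (F a i x y)

-- the body of A's gap loop (b = loop index, p = boundaries[b], q = boundaries[b+1])
def pvBody (ms : List PVE) (asg : List (Option String)) (b p q : Int) : List (Option String) :=
  if p + 1 ≥ q then asg
  else
    (PySem.List.pyRange (p + 1) q).foldl (fun a i => PySem.List.pySetD a i
      (if q - (p + 1) ≤ pvMAX_UNTAGGED_RUN then
        if 0 < b ∧ 0 ≤ p then PySem.List.pyGetD asg p none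
        else if q < (ms.length : Int) ∧ (PySem.List.pyGetD asg q none).isSome then
          PySem.List.pyGetD asg q none
        else some (makeAddrModule (PySem.List.pyGetD ms (p + 1) pvDummy).1)
      else some (makeAddrModule (PySem.List.pyGetD ms (p + 1) pvDummy).1))) asg

-- one step of the dict-building fold (shared shape of both sides)
def pvStep1 (d : PVDict) (q : PVE × String) : PVDict :=
  d.modify q.2 [] (fun v => v ++ [pvStrip3 q.1])

-- ---- basic lemmas ----

theorem pvSplitEq (l : List PVE) (acc1 acc2 : List PVE) :
    l.foldl (fun (tm : List PVE × List PVE) f =>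
      if pvIsThunk f then (tm.1 ++ [f], tm.2) else (tm.1, tm.2 ++ [f])) (acc1, acc2)
    = (acc1 ++ l.filter pvIsThunk, acc2 ++ l.filter (fun f => !pvIsThunk f)) := by
  induction l generalizing acc1 acc2 with
  | nil => simp
  | cons f l ih =>
    cases h : pvIsThunk f <;> simp [h, ih]

theorem pvAnchorsEq (ms : List PVE) (s : Int) (acc : List Int) :
    (PySem.List.enumerate (ms.map pvTagOf) s).foldl
      (fun (acc : List Int) p => if p.2.isSome then acc ++ [p.1] else acc) acc
    = acc ++ pvAbsAnchors s ms := by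
  induction ms generalizing s acc with
  | nil => simp [pvAbsAnchors]
  | cons e rest ih =>
    cases h : pvIsTruthy e.2.2.2 <;>
      simp [PySem.List.enumerate_cons, pvTagOf, pvAbsAnchors, h, ih]

theorem pvMemAbsAnchors (ms : List PVE) (m i : Int) :
    i ∈ pvAbsAnchors m ms ↔ ∃ (k : Nat) (h : k < ms.length), i = m + k ∧ pvIsTruthy ms[k].2.2.2 = true := by
  induction ms generalizing m with
  | nil => simp [pvAbsAnchors]
  | cons e rest ih =>
    constructor
    · intro hmem
      have hsplit : (i = m ∧ pvIsTruthy e.2.2.2 = true) ∨ i ∈ pvAbsAnchors (m + 1) rest := by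
        by_cases h : pvIsTruthy e.2.2.2 = true
        · simp only [pvAbsAnchors, if_pos h, List.mem_cons] at hmem
          tauto
        · simp only [pvAbsAnchors, if_neg h] at hmem
          tauto
      rcases hsplit with ⟨rfl, ht⟩ | hmem2
      · exact ⟨0, by simp, by simp, by simpa using ht⟩
      · rcases (ih (m + 1)).mp hmem2 with ⟨k, hk, hik, hkt⟩
        exact ⟨k + 1, by simp; omega, by push_cast at hik ⊢; omega, by simpa using hkt⟩
    · rintro ⟨k, hk, hik, hkt⟩
      match k, hk, hik, hkt with
      | 0, hk, hik, hkt =>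
        have ht : pvIsTruthy e.2.2.2 = true := by simpa using hkt
        simp only [pvAbsAnchors, if_pos ht, List.mem_cons]
        left; simpa using hik
      | k + 1, hk, hik, hkt =>
        have hmem2 : i ∈ pvAbsAnchors (m + 1) rest :=
          (ih (m + 1)).mpr ⟨k, by simp at hk; omega, by push_cast at hik ⊢; omega, by simpa using hkt⟩
        by_cases h : pvIsTruthy e.2.2.2 = true
        · simp only [pvAbsAnchors, if_pos h, List.mem_cons]; right; exact hmem2
        · simp only [pvAbsAnchors, if_neg h]; exact hmem2

theorem pvAbsAnchorsAppend (u v : List PVE) (m : Int) :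
    pvAbsAnchors m (u ++ v) = pvAbsAnchors m u ++ pvAbsAnchors (m + u.length) v := by
  induction u generalizing m with
  | nil => simp [pvAbsAnchors]
  | cons e u ih =>
    have harith : m + 1 + (u.length : Int) = m + (((e :: u).length : Nat) : Int) := by
      simp only [List.length_cons]; push_cast; ring
    cases h : pvIsTruthy e.2.2.2 <;>
      simp only [List.cons_append, pvAbsAnchors, h, Bool.false_eq_true, if_false, if_true, ih,
        List.cons_append] <;> rw [harith]

theorem pvAbsAnchorsNil (u : List PVE) (m : Int) (h : ∀ e ∈ u, pvIsTruthy e.2.2.2 = false) :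
    pvAbsAnchors m u = [] := by
  induction u generalizing m with
  | nil => simp [pvAbsAnchors]
  | cons e u ih =>
    have he := h e (by simp)
    have hrest := ih (m := m + 1) (fun x hx => h x (by simp [hx]))
    simp [pvAbsAnchors, he, hrest]

theorem pvLenFoldlSet {α : Type} (l : List Int) (g : Int → α) (asg : List α) :
    (l.foldl (fun a i => PySem.List.pySetD a i (g i)) asg).length = asg.length := by
  induction l generalizing asg with
  | nil => rfl
  | cons i l ih => simp [ih, PySem.List.length_pySetD]

theorem pvGetFoldlSet {α : Type} (l : List Int) (g : Int → α) (asg : List α) (j : Nat)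
    (hpos : ∀ i ∈ l, 0 ≤ i) (hj : j < asg.length) :
    (l.foldl (fun a i => PySem.List.pySetD a i (g i)) asg)[j]?
    = if (j : Int) ∈ l then some (g j) else asg[j]? := by
  induction l generalizing asg with
  | nil => simp
  | cons i l ih =>
    have hi : 0 ≤ i := hpos i (by simp)
    have hlen : (PySem.List.pySetD asg i (g i)).length = asg.length :=
      PySem.List.length_pySetD asg i (g i)
    rw [List.foldl_cons, ih (PySem.List.pySetD asg i (g i))
      (fun x hx => hpos x (by simp [hx])) (by rw [hlen]; exact hj)]
    by_cases hmem : (j : Int) ∈ l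
    · simp [hmem]
    · rcases eq_or_ne i (j : Int) with rfl | hne
      · rw [PySem.List.pySetD_of_nonneg _ _ hi]
        simp [List.getElem?_set_self hj, hmem]
      · rw [PySem.List.pySetD_of_nonneg _ _ hi]
        have hne2 : i.toNat ≠ j := by omega
        simp [List.getElem?_set_ne hne2, hmem, List.mem_cons, Ne.symm hne]

-- reading at the junction of an append
theorem pvGetAt {α : Type} (l1 : List α) (x : α) (l2 : List α) (d : α) (i : Int)
    (h : i = (l1.length : Int)) :
    PySem.List.pyGetD (l1 ++ x :: l2) i d = x := by
  subst h
  rw [PySem.List.pyGetD_eq_getElem _ _ (by positivity) (by simp)]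
  simp [List.getElem_append_right (le_refl l1.length)]

-- writing the range [front.length, front.length + mid.length) overwrites exactly mid
theorem pvWriteRange {α : Type} (mid front back : List α) (tag : α) :
    (PySem.List.pyRange (front.length : Int) ((front.length : Int) + (mid.length : Int))).foldl
      (fun a i => PySem.List.pySetD a i tag) (front ++ (mid ++ back))
    = front ++ (List.replicate mid.length tag ++ back) := by
  induction mid generalizing front with
  | nil =>
    rw [PySem.List.pyRange_one_eq_nil (by simp)]
    simp
  | cons m0 mid ih =>
    have hlt : (front.length : Int) < (front.length : Int) + (((m0 :: mid).length : Nat) : Int) := by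
      simp only [List.length_cons]; push_cast; omega
    rw [PySem.List.pyRange_one_cons hlt, List.foldl_cons]
    have hset : PySem.List.pySetD (front ++ (m0 :: mid ++ back)) (front.length : Int) tag
        = (front ++ [tag]) ++ (mid ++ back) := by
      rw [PySem.List.pySetD_of_nonneg _ _ (by positivity)]
      simp
    rw [hset]
    have h1 : (front.length : Int) + 1 = (((front ++ [tag]).length : Nat) : Int) := by simp
    have h2 : (front.length : Int) + (((m0 :: mid).length : Nat) : Int)
        = (((front ++ [tag]).length : Nat) : Int) + ((mid.length : Nat) : Int) := by
      simp only [List.length_cons, List.length_append, List.length_nil]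
      push_cast; ring
    rw [h1, h2, ih (front ++ [tag])]
    simp [List.replicate_succ]

-- a range fold reading adjacent entries of a list is pvPairRec
theorem pvGetDConsSucc {α : Type} (x : α) (l : List α) (k : Nat) (d : α) :
    PySem.List.pyGetD (x :: l) ((k : Int) + 1) d = PySem.List.pyGetD l (k : Int) d := by
  have h : ((k : Int) + 1) = ((k + 1 : Nat) : Int) := by push_cast; ring
  rw [h, PySem.List.pyGetD_natCast, PySem.List.pyGetD_natCast, List.getD_cons_succ]

theorem pvRangeToPairRec {σ : Type} (F : σ → Int → Int → Int → σ) :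
    ∀ (bs : List Int) (i : Int) (a : σ),
    (PySem.List.pyRange 0 ((bs.length : Int) - 1)).foldl
      (fun s b => F s (b + i) (PySem.List.pyGetD bs b 0) (PySem.List.pyGetD bs (b + 1) 0)) a
    = pvPairRec F i bs a := by
  intro bs
  induction bs with
  | nil => intro i a; rw [PySem.List.pyRange_one_eq_nil (by simp)]; rfl
  | cons x bs ih =>
    intro i a
    cases bs with
    | nil => rw [PySem.List.pyRange_one_eq_nil (by simp)]; rfl
    | cons y rest =>
      have hlt : (0 : Int) < ((x :: y :: rest).length : Int) - 1 := by simp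
      rw [PySem.List.pyRange_one_cons hlt, List.foldl_cons]
      have hstep : pvPairRec F i (x :: y :: rest) a = pvPairRec F (i + 1) (y :: rest) (F a i x y) := rfl
      rw [hstep, ← ih (i + 1) (F a i x y)]
      have hfirst : F a (0 + i) (PySem.List.pyGetD (x :: y :: rest) 0 0)
          (PySem.List.pyGetD (x :: y :: rest) (0 + 1) 0) = F a i x y := by
        norm_num
        rw [show (1 : Int) = ((1 : Nat) : Int) from rfl, PySem.List.pyGetD_natCast]
        simp
      show (PySem.List.pyRange 1 (((x :: y :: rest).length : Int) - 1)).foldl _ (F a (0+i) (PySem.List.pyGetD (x :: y :: rest) 0 0) (PySem.List.pyGetD (x :: y :: rest) (0 + 1) 0)) = _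
      rw [hfirst]
      rw [PySem.List.pyRange_one 1, PySem.List.pyRange_one 0]
      have hn1 : ((((x :: y :: rest).length : Nat) : Int) - 1 - 1).toNat = rest.length := by simp
      have hn2 : ((((y :: rest).length : Nat) : Int) - 1 - 0).toNat = rest.length := by simp
      rw [hn1, hn2, List.foldl_map, List.foldl_map]
      apply PySem.List.foldl_congr_mem
      intro acc k hk
      have e1 : (1 : Int) + (k : Int) + i = (0 : Int) + (k : Int) + (i + 1) := by ring
      have e2 : PySem.List.pyGetD (x :: y :: rest) ((1 : Int) + (k : Int)) 0
          = PySem.List.pyGetD (y :: rest) ((0 : Int) + (k : Int)) 0 := by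
        rw [show (1 : Int) + (k : Int) = (k : Int) + 1 from by ring, pvGetDConsSucc]
        norm_num
      have e3 : PySem.List.pyGetD (x :: y :: rest) ((1 : Int) + (k : Int) + 1) 0
          = PySem.List.pyGetD (y :: rest) ((0 : Int) + (k : Int) + 1) 0 := by
        rw [show (1 : Int) + (k : Int) + 1 = ((k + 1 : Nat) : Int) + 1 from by push_cast; ring,
          pvGetDConsSucc]
        norm_num
      rw [e1, e2, e3]

theorem pvSpecAsgAppendUntagged (u : List PVE) (h : ∀ e ∈ u, pvIsTruthy e.2.2.2 = false) :
    ∀ (cur : Option String) (buf rest : List PVE),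
    pvSpecAsg cur buf (u ++ rest) = pvSpecAsg cur (buf ++ u) rest := by
  induction u with
  | nil => intro cur buf rest; simp
  | cons e u ih =>
    intro cur buf rest
    have he := h e (by simp)
    rw [List.cons_append]
    show pvSpecAsg cur buf (e :: (u ++ rest)) = _
    rw [show pvSpecAsg cur buf (e :: (u ++ rest))
        = if pvIsTruthy e.2.2.2 = false then pvSpecAsg cur (buf ++ [e]) (u ++ rest)
          else pvFlushTags cur (some (PySem.Str.replace (e.2.2.2.getD "") ".c" "")) buf
            ++ (PySem.Str.replace (e.2.2.2.getD "") ".c" "")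
            :: pvSpecAsg (some (PySem.Str.replace (e.2.2.2.getD "") ".c" "")) [] (u ++ rest) from rfl]
    rw [if_pos (by simp [he]), ih (fun x hx => h x (by simp [hx]))]
    simp

theorem pvPickSomeCur (c : String) (nxt nxt' : Option String) (b0 : PVE) (len : Nat) :
    pvPickTag (some c) nxt b0 len = pvPickTag (some c) nxt' b0 len := by
  unfold pvPickTag
  split <;> rfl

theorem pvFlushTagsSomeCur (c : String) (nxt nxt' : Option String) (buf : List PVE) :
    pvFlushTags (some c) nxt buf = pvFlushTags (some c) nxt' buf := by
  cases buf <;> simp [pvFlushTags, pvPickSomeCur (nxt' := nxt')]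

theorem pvWriteRange0 {α : Type} (mid back : List α) (tag : α) :
    (PySem.List.pyRange 0 (mid.length : Int)).foldl
      (fun a i => PySem.List.pySetD a i tag) (mid ++ back)
    = List.replicate mid.length tag ++ back := by
  have h := pvWriteRange mid [] back tag
  simpa using h

theorem pvWriteRangeAll {α : Type} (mid : List α) (tag : α) :
    (PySem.List.pyRange 0 (mid.length : Int)).foldl
      (fun a i => PySem.List.pySetD a i tag) mid
    = List.replicate mid.length tag := by
  have h := pvWriteRange0 mid [] tag
  simpa using h

-- evaluation of one gap-writing body in context: preceding anchor tag cur, untagged run u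
theorem pvBodyGap (u pre tailE : List PVE) (Z : List (Option String)) (done : List String)
    (cur : String) (i : Int)
    (hu : ∀ e ∈ u, pvIsTruthy e.2.2.2 = false)
    (hlen : done.length = pre.length)
    (hlast : done.getLast? = some cur)
    (hi : 1 ≤ i) :
    pvBody (pre ++ (u ++ tailE)) ((done.map some) ++ (u.map pvTagOf ++ Z)) i
      ((pre.length : Int) - 1) ((pre.length : Int) + (u.length : Int))
    = ((done ++ pvFlushTags (some cur) none u).map some) ++ Z := by
  rcases List.getLast?_eq_some_iff.mp hlast with ⟨done', rfl⟩
  have hlen' : done'.length + 1 = pre.length := by simpa using hlen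
  cases u with
  | nil =>
    rw [pvBody, if_pos (by simp)]
    simp [pvFlushTags]
  | cons u0 u' =>
    rw [pvBody, if_neg (by simp only [List.length_cons]; push_cast; omega)]
    have harS : (pre.length : Int) - 1 + 1 = (pre.length : Int) := by omega
    rw [harS]
    have hgap : (pre.length : Int) + ((u0 :: u').length : Int) - (pre.length : Int)
        = ((u0 :: u').length : Int) := by omega
    rw [hgap]
    have hasg : ((done' ++ [cur]).map some) ++ ((u0 :: u').map pvTagOf ++ Z)
        = (done'.map some) ++ (some cur :: ((u0 :: u').map pvTagOf ++ Z)) := by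
      simp
    have hread : PySem.List.pyGetD (((done' ++ [cur]).map some) ++ ((u0 :: u').map pvTagOf ++ Z))
        ((pre.length : Int) - 1) none = some cur := by
      rw [hasg]
      exact pvGetAt _ _ _ _ _ (by simp; omega)
    have hmsread : PySem.List.pyGetD (pre ++ (u0 :: u' ++ tailE)) (pre.length : Int) pvDummy = u0 := by
      exact pvGetAt _ _ _ _ _ (by simp)
    have htag : (if (((u0 :: u').length : Nat) : Int) ≤ pvMAX_UNTAGGED_RUN then
          if 0 < i ∧ 0 ≤ (pre.length : Int) - 1 then
            PySem.List.pyGetD (((done' ++ [cur]).map some) ++ ((u0 :: u').map pvTagOf ++ Z)) ((pre.length : Int) - 1) none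
          else if (pre.length : Int) + ((u0 :: u').length : Int) < ((pre ++ (u0 :: u' ++ tailE)).length : Int) ∧
              (PySem.List.pyGetD (((done' ++ [cur]).map some) ++ ((u0 :: u').map pvTagOf ++ Z)) ((pre.length : Int) + ((u0 :: u').length : Int)) none).isSome then
            PySem.List.pyGetD (((done' ++ [cur]).map some) ++ ((u0 :: u').map pvTagOf ++ Z)) ((pre.length : Int) + ((u0 :: u').length : Int)) none
          else some (makeAddrModule (PySem.List.pyGetD (pre ++ (u0 :: u' ++ tailE)) (pre.length : Int) pvDummy).1)
        else some (makeAddrModule (PySem.List.pyGetD (pre ++ (u0 :: u' ++ tailE)) (pre.length : Int) pvDummy).1))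
        = some (pvPickTag (some cur) none u0 (u0 :: u').length) := by
      by_cases hgap8 : (((u0 :: u').length : Nat) : Int) ≤ pvMAX_UNTAGGED_RUN
      · rw [if_pos hgap8, if_pos ⟨by omega, by omega⟩, hread]
        unfold pvPickTag
        rw [if_neg (by unfold pvMAX_UNTAGGED_RUN at hgap8 ⊢; omega)]
      · rw [if_neg hgap8, hmsread]
        unfold pvPickTag
        rw [if_pos (by unfold pvMAX_UNTAGGED_RUN at hgap8 ⊢; omega)]
    rw [htag]
    have hfr : (pre.length : Int) = ((((done' ++ [cur]).map some).length : Nat) : Int) := by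
      simp; omega
    have hmidl : (((u0 :: u').length : Nat) : Int) = ((((u0 :: u').map pvTagOf).length : Nat) : Int) := by
      simp
    rw [hfr, hmidl, pvWriteRange]
    simp [pvFlushTags, List.append_assoc]

-- the leading gap (no preceding anchor, following anchor exists)
theorem pvBodyLeadAnchor (u : List PVE) (e : PVE) (r' : List PVE) (t : String)
    (hu : ∀ x ∈ u, pvIsTruthy x.2.2.2 = false)
    (_he : pvIsTruthy e.2.2.2 = true)
    (_ht : t = PySem.Str.replace (e.2.2.2.getD "") ".c" "") :
    pvBody (u ++ e :: r') (u.map pvTagOf ++ (some t :: r'.map pvTagOf)) 0 (-1) (u.length : Int)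
    = ((pvFlushTags none (some t) u).map some) ++ (some t :: r'.map pvTagOf) := by
  cases u with
  | nil =>
    rw [pvBody, if_pos (by simp)]
    simp [pvFlushTags]
  | cons u0 u' =>
    rw [pvBody, if_neg (by simp only [List.length_cons]; push_cast; omega)]
    have harS : (-1 : Int) + 1 = 0 := by omega
    rw [harS, sub_zero]
    have hreadq : PySem.List.pyGetD ((u0 :: u').map pvTagOf ++ (some t :: r'.map pvTagOf))
        (((u0 :: u').length : Nat) : Int) none = some t := pvGetAt _ _ _ _ _ (by simp)
    have hms0 : PySem.List.pyGetD ((u0 :: u') ++ e :: r') (0 : Int) pvDummy = u0 := by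
      rw [List.cons_append, PySem.List.pyGetD_zero_cons]
    have htag : (if (((u0 :: u').length : Nat) : Int) ≤ pvMAX_UNTAGGED_RUN then
          if 0 < (0 : Int) ∧ 0 ≤ (-1 : Int) then
            PySem.List.pyGetD ((u0 :: u').map pvTagOf ++ (some t :: r'.map pvTagOf)) (-1) none
          else if (((u0 :: u').length : Nat) : Int) < (((u0 :: u') ++ e :: r').length : Int) ∧
              (PySem.List.pyGetD ((u0 :: u').map pvTagOf ++ (some t :: r'.map pvTagOf)) (((u0 :: u').length : Nat) : Int) none).isSome then
            PySem.List.pyGetD ((u0 :: u').map pvTagOf ++ (some t :: r'.map pvTagOf)) (((u0 :: u').length : Nat) : Int) none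
          else some (makeAddrModule (PySem.List.pyGetD ((u0 :: u') ++ e :: r') (0 : Int) pvDummy).1)
        else some (makeAddrModule (PySem.List.pyGetD ((u0 :: u') ++ e :: r') (0 : Int) pvDummy).1))
        = some (pvPickTag none (some t) u0 (u0 :: u').length) := by
      by_cases hgap8 : (((u0 :: u').length : Nat) : Int) ≤ pvMAX_UNTAGGED_RUN
      · rw [if_pos hgap8, if_neg (by simp), if_pos ⟨by simp, by rw [hreadq]; rfl⟩, hreadq]
        unfold pvPickTag
        rw [if_neg (by unfold pvMAX_UNTAGGED_RUN at hgap8 ⊢; omega)]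
      · rw [if_neg hgap8, hms0]
        unfold pvPickTag
        rw [if_pos (by unfold pvMAX_UNTAGGED_RUN at hgap8 ⊢; omega)]
    rw [htag]
    have hmidl : (((u0 :: u').length : Nat) : Int) = ((((u0 :: u').map pvTagOf).length : Nat) : Int) := by
      simp
    rw [hmidl, pvWriteRange0]
    simp [pvFlushTags]

-- the leading gap when there is no anchor at all
theorem pvBodyLeadNone (u : List PVE)
    (hu : ∀ x ∈ u, pvIsTruthy x.2.2.2 = false) :
    pvBody u (u.map pvTagOf) 0 (-1) (u.length : Int)
    = (pvFlushTags none none u).map some := by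
  cases u with
  | nil =>
    rw [pvBody, if_pos (by simp)]
    simp [pvFlushTags]
  | cons u0 u' =>
    rw [pvBody, if_neg (by simp only [List.length_cons]; push_cast; omega)]
    have harS : (-1 : Int) + 1 = 0 := by omega
    rw [harS, sub_zero]
    have hms0 : PySem.List.pyGetD (u0 :: u') (0 : Int) pvDummy = u0 := PySem.List.pyGetD_zero_cons _ _ _
    have htag : (if (((u0 :: u').length : Nat) : Int) ≤ pvMAX_UNTAGGED_RUN then
          if 0 < (0 : Int) ∧ 0 ≤ (-1 : Int) then
            PySem.List.pyGetD ((u0 :: u').map pvTagOf) (-1) none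
          else if (((u0 :: u').length : Nat) : Int) < (((u0 :: u')).length : Int) ∧
              (PySem.List.pyGetD ((u0 :: u').map pvTagOf) (((u0 :: u').length : Nat) : Int) none).isSome then
            PySem.List.pyGetD ((u0 :: u').map pvTagOf) (((u0 :: u').length : Nat) : Int) none
          else some (makeAddrModule (PySem.List.pyGetD (u0 :: u') (0 : Int) pvDummy).1)
        else some (makeAddrModule (PySem.List.pyGetD (u0 :: u') (0 : Int) pvDummy).1))
        = some (pvPickTag none none u0 (u0 :: u').length) := by
      by_cases hgap8 : (((u0 :: u').length : Nat) : Int) ≤ pvMAX_UNTAGGED_RUN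
      · rw [if_pos hgap8, if_neg (by simp), if_neg (by rintro ⟨h, -⟩; exact absurd h (by simp)), hms0]
        unfold pvPickTag
        rw [if_neg (by unfold pvMAX_UNTAGGED_RUN at hgap8 ⊢; omega)]
      · rw [if_neg hgap8, hms0]
        unfold pvPickTag
        rw [if_pos (by unfold pvMAX_UNTAGGED_RUN at hgap8 ⊢; omega)]
    rw [htag]
    have hmidl : (((u0 :: u').length : Nat) : Int) = ((((u0 :: u').map pvTagOf).length : Nat) : Int) := by
      simp
    rw [hmidl, pvWriteRangeAll]
    simp [pvFlushTags]

theorem pvLenFlushTags (cur nxt : Option String) (buf : List PVE) :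
    (pvFlushTags cur nxt buf).length = buf.length := by
  cases buf <;> simp [pvFlushTags]

-- the main gap-loop lemma: from an anchor onwards, A's loop produces pvSpecAsg
theorem pvGapLemma :
    ∀ (N : Nat) (rest pre : List PVE) (done : List String) (cur : String) (i : Int),
    rest.length ≤ N →
    done.length = pre.length →
    done.getLast? = some cur →
    1 ≤ i →
    pvPairRec (pvBody (pre ++ rest)) i
      (((pre.length : Int) - 1) :: (pvAbsAnchors (pre.length : Int) rest ++ [(pre.length : Int) + (rest.length : Int)]))
      ((done.map some) ++ rest.map pvTagOf)
    = (done ++ pvSpecAsg (some cur) [] rest).map some := by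
  intro N
  induction N with
  | zero =>
    intro rest pre done cur i hN hlen hlast hi
    have hrest : rest = [] := List.eq_nil_of_length_eq_zero (by omega)
    subst hrest
    have h := pvBodyGap [] pre [] [] done cur i (by simp) hlen hlast hi
    simpa [pvPairRec, pvAbsAnchors, pvSpecAsg, pvFlushTags] using h
  | succ N ih =>
    intro rest pre done cur i hN hlen hlast hi
    cases hr : rest.dropWhile (fun e => !pvIsTruthy e.2.2.2) with
    | nil =>
      have hu : ∀ e ∈ rest, pvIsTruthy e.2.2.2 = false := by
        intro e hee
        simpa using List.dropWhile_eq_nil_iff.mp hr e hee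
      rw [pvAbsAnchorsNil _ _ hu, List.nil_append]
      have h := pvBodyGap rest pre [] [] done cur i hu hlen hlast hi
      have hspec : pvSpecAsg (some cur) [] rest = pvFlushTags (some cur) none rest := by
        have h2 := pvSpecAsgAppendUntagged rest hu (some cur) [] []
        simpa [pvSpecAsg] using h2
      rw [hspec]
      simpa [pvPairRec] using h
    | cons e r' =>
      have hrest : rest = rest.takeWhile (fun e => !pvIsTruthy e.2.2.2) ++ e :: r' := by
        conv_lhs => rw [← List.takeWhile_append_dropWhile (p := fun e => !pvIsTruthy e.2.2.2) (l := rest)]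
        rw [hr]
      set u := rest.takeWhile (fun e => !pvIsTruthy e.2.2.2) with hu_def
      have hu : ∀ x ∈ u, pvIsTruthy x.2.2.2 = false := by
        intro x hx
        simpa using List.mem_takeWhile_imp hx
      have he : pvIsTruthy e.2.2.2 = true := by
        have hne : rest.dropWhile (fun x : PVE => !pvIsTruthy x.2.2.2) ≠ [] := by simp [hr]
        have hh := List.head_dropWhile_not (fun x : PVE => !pvIsTruthy x.2.2.2) hne
        simp only [hr, List.head_cons] at hh
        simpa using hh
      have hlenr : r'.length ≤ N := by
        have : rest.length = u.length + 1 + r'.length := by rw [hrest]; simp; omega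
        omega
      rw [hrest]
      set t := PySem.Str.replace (e.2.2.2.getD "") ".c" "" with ht_def
      -- anchors of u ++ e :: r'
      rw [pvAbsAnchorsAppend, pvAbsAnchorsNil u _ hu, List.nil_append,
        show pvAbsAnchors ((pre.length : Int) + (u.length : Int)) (e :: r')
          = ((pre.length : Int) + (u.length : Int)) :: pvAbsAnchors ((pre.length : Int) + (u.length : Int) + 1) r'
          from by simp [pvAbsAnchors, he]]
      -- the assignment list
      rw [show (u ++ e :: r').map pvTagOf = u.map pvTagOf ++ (some t :: r'.map pvTagOf) from by
        simp [pvTagOf, he, ht_def]]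
      -- one pvPairRec step
      rw [List.cons_append,
        show pvPairRec (pvBody (pre ++ (u ++ e :: r'))) i
            (((pre.length : Int) - 1) :: ((pre.length : Int) + (u.length : Int)) ::
              (pvAbsAnchors ((pre.length : Int) + (u.length : Int) + 1) r' ++ [(pre.length : Int) + ((u ++ e :: r').length : Int)]))
            ((done.map some) ++ (u.map pvTagOf ++ (some t :: r'.map pvTagOf)))
          = pvPairRec (pvBody (pre ++ (u ++ e :: r'))) (i + 1)
            (((pre.length : Int) + (u.length : Int)) ::
              (pvAbsAnchors ((pre.length : Int) + (u.length : Int) + 1) r' ++ [(pre.length : Int) + ((u ++ e :: r').length : Int)]))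
            (pvBody (pre ++ (u ++ e :: r')) ((done.map some) ++ (u.map pvTagOf ++ (some t :: r'.map pvTagOf))) i
              ((pre.length : Int) - 1) ((pre.length : Int) + (u.length : Int)))
          from rfl]
      rw [pvBodyGap u pre (e :: r') (some t :: r'.map pvTagOf) done cur i hu hlen hlast hi]
      -- reshape state and apply the induction hypothesis at pre ++ u ++ [e]
      have hih := ih r' (pre ++ u ++ [e]) (done ++ pvFlushTags (some cur) none u ++ [t]) t (i + 1)
        hlenr (by simp [pvLenFlushTags, hlen]) (List.getLast?_concat) (by omega)
      rw [show ((done ++ pvFlushTags (some cur) none u).map some) ++ (some t :: r'.map pvTagOf)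
          = (((done ++ pvFlushTags (some cur) none u ++ [t]).map some)) ++ r'.map pvTagOf from by simp]
      rw [show pre ++ (u ++ e :: r') = (pre ++ u ++ [e]) ++ r' from by simp]
      rw [show (pre.length : Int) + (u.length : Int) = (((pre ++ u ++ [e]).length : Nat) : Int) - 1 from by
        simp; ring]
      rw [show ((((pre ++ u ++ [e]).length : Nat) : Int) - 1) + 1 = (((pre ++ u ++ [e]).length : Nat) : Int) from by ring]
      rw [show (pre.length : Int) + (((u ++ e :: r').length : Nat) : Int)
          = (((pre ++ u ++ [e]).length : Nat) : Int) + ((r'.length : Nat) : Int) from by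
        simp; ring]
      rw [hih]
      -- and reshape the spec side
      rw [pvSpecAsgAppendUntagged u hu (some cur) [] (e :: r'), List.nil_append,
        show pvSpecAsg (some cur) u (e :: r') = pvFlushTags (some cur) (some t) u ++ t :: pvSpecAsg (some t) [] r'
          from by simp [pvSpecAsg, he, ht_def],
        pvFlushTagsSomeCur cur (some t) none u]
      simp

-- A's gap loop on the full list produces pvSpecAsg
theorem pvStepI (ms : List PVE) :
    pvPairRec (pvBody ms) 0 ((-1) :: (pvAbsAnchors 0 ms ++ [(ms.length : Int)])) (ms.map pvTagOf)
    = (pvSpecAsg none [] ms).map some := by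
  cases hr : ms.dropWhile (fun x : PVE => !pvIsTruthy x.2.2.2) with
  | nil =>
    have hu : ∀ e ∈ ms, pvIsTruthy e.2.2.2 = false := fun e hee => by
      simpa using List.dropWhile_eq_nil_iff.mp hr e hee
    rw [pvAbsAnchorsNil _ _ hu, List.nil_append]
    have h := pvBodyLeadNone ms hu
    have hspec : pvSpecAsg none [] ms = pvFlushTags none none ms := by
      have h2 := pvSpecAsgAppendUntagged ms hu none [] []
      simpa [pvSpecAsg] using h2
    rw [hspec]
    simpa [pvPairRec] using h
  | cons e r' =>
    have hms : ms = ms.takeWhile (fun x : PVE => !pvIsTruthy x.2.2.2) ++ e :: r' := by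
      conv_lhs => rw [← List.takeWhile_append_dropWhile (p := fun x : PVE => !pvIsTruthy x.2.2.2) (l := ms)]
      rw [hr]
    set u := ms.takeWhile (fun x : PVE => !pvIsTruthy x.2.2.2) with hu_def
    have hu : ∀ x ∈ u, pvIsTruthy x.2.2.2 = false := fun x hx => by
      simpa using List.mem_takeWhile_imp hx
    have he : pvIsTruthy e.2.2.2 = true := by
      have hne : ms.dropWhile (fun x : PVE => !pvIsTruthy x.2.2.2) ≠ [] := by simp [hr]
      have hh := List.head_dropWhile_not (fun x : PVE => !pvIsTruthy x.2.2.2) hne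
      simp only [hr, List.head_cons] at hh
      simpa using hh
    rw [hms]
    set t := PySem.Str.replace (e.2.2.2.getD "") ".c" "" with ht_def
    rw [show pvAbsAnchors 0 (u ++ e :: r') = (u.length : Int) :: pvAbsAnchors ((u.length : Int) + 1) r' from by
      rw [pvAbsAnchorsAppend, pvAbsAnchorsNil u _ hu, List.nil_append]
      simp [pvAbsAnchors, he]]
    rw [show (u ++ e :: r').map pvTagOf = u.map pvTagOf ++ (some t :: r'.map pvTagOf) from by
      simp [pvTagOf, he, ht_def]]
    rw [List.cons_append,
      show pvPairRec (pvBody (u ++ e :: r')) 0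
          ((-1) :: (u.length : Int) :: (pvAbsAnchors ((u.length : Int) + 1) r' ++ [((u ++ e :: r').length : Int)]))
          (u.map pvTagOf ++ (some t :: r'.map pvTagOf))
        = pvPairRec (pvBody (u ++ e :: r')) (0 + 1)
          ((u.length : Int) :: (pvAbsAnchors ((u.length : Int) + 1) r' ++ [((u ++ e :: r').length : Int)]))
          (pvBody (u ++ e :: r') (u.map pvTagOf ++ (some t :: r'.map pvTagOf)) 0 (-1) (u.length : Int))
        from rfl]
    rw [pvBodyLeadAnchor u e r' t hu he ht_def,
      show ((0 : Int) + 1) = 1 from by norm_num]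
    rw [show ((pvFlushTags none (some t) u).map some) ++ (some t :: r'.map pvTagOf)
        = (((pvFlushTags none (some t) u ++ [t]).map some)) ++ r'.map pvTagOf from by simp]
    rw [pvSpecAsgAppendUntagged u hu none [] (e :: r'), List.nil_append,
      show pvSpecAsg none u (e :: r') = pvFlushTags none (some t) u ++ t :: pvSpecAsg (some t) [] r'
        from by simp [pvSpecAsg, he, ht_def]]
    rw [show u ++ e :: r' = (u ++ [e]) ++ r' from by simp]
    rw [show (u.length : Int) = (((u ++ [e]).length : Nat) : Int) - 1 from by simp]
    rw [show ((((u ++ [e]).length : Nat) : Int) - 1) + 1 = (((u ++ [e]).length : Nat) : Int) from by ring]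
    rw [show ((((u ++ [e]) ++ r').length : Nat) : Int)
        = (((u ++ [e]).length : Nat) : Int) + ((r'.length : Nat) : Int) from by simp [List.length_append]; ring]
    rw [pvGapLemma r'.length r' (u ++ [e]) (pvFlushTags none (some t) u ++ [t]) t 1
      (le_refl _) (by simp [pvLenFlushTags]) (List.getLast?_concat) (by omega)]
    simp

-- the fallback loop is the identity on an all-some assignment list
theorem pvFallbackId (ms : List PVE) (xs : List Int) (w : List String) :
    xs.foldl (fun a i =>
      if PySem.List.pyGetD a i none = none then
        PySem.List.pySetD a i (some (makeAddrModule (PySem.List.pyGetD ms i pvDummy).1))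
      else a) (w.map some)
    = w.map some := by
  induction xs with
  | nil => rfl
  | cons i l ih =>
    rw [List.foldl_cons]
    have hstep : (if PySem.List.pyGetD (w.map some) i none = none then
        PySem.List.pySetD (w.map some) i (some (makeAddrModule (PySem.List.pyGetD ms i pvDummy).1))
      else (w.map some)) = w.map some := by
      by_cases hr2 : PySem.Raise.InRange (w.map some).length i
      · rw [if_neg]
        intro hnone
        have hmem := PySem.List.pyGetD_mem (w.map some) (d := none) hr2
        rw [hnone] at hmem
        simp at hmem
      · have hget : PySem.List.pyGet? (w.map some) i = none := by
          rw [PySem.List.pyGet?_eq_none_iff]; exact hr2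
        rw [if_pos (PySem.List.pyGetD_of_none _ _ _ hget)]
        unfold PySem.List.pySetD
        rw [(PySem.List.pySet?_eq_none_iff _ _ _).mpr hr2]
        rfl
    rw [hstep, ih]

theorem pvModifyFold (x : Int × String × Int) (l : List (Int × String × Int)) (k : String) (d : PVDict) :
    (x :: l).foldl (fun d y => d.modify k [] (fun v => v ++ [y])) d
    = d.modify k [] (fun v => v ++ (x :: l)) := by
  induction l generalizing d x with
  | nil => rfl
  | cons y l ih =>
    rw [List.foldl_cons, ih y (d.modify k [] (fun v => v ++ [x]))]
    simp [PySem.Dict.modify, PySem.Dict.getD_insert_self, PySem.Dict.insert_insert_self]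

theorem pvFlushAsFold (d : PVDict) (cur nxt : Option String) (buf : List PVE) :
    pvFlush d cur buf nxt
    = ((buf.zip (pvFlushTags cur nxt buf)).foldl pvStep1 d) := by
  cases buf with
  | nil => simp [pvFlush, pvFlushTags]
  | cons b0 bs =>
    have hzip : ∀ (l : List PVE) (tg : String), l.zip (List.replicate l.length tg) = l.map (fun e => (e, tg)) := by
      intro l tg
      induction l with
      | nil => rfl
      | cons a l ih => simp [List.replicate_succ, ih]
    rw [show pvFlushTags cur nxt (b0 :: bs)
        = List.replicate (b0 :: bs).length (pvPickTag cur nxt b0 (b0 :: bs).length) from rfl,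
      hzip, List.foldl_map]
    rw [show (fun (d : PVDict) (e : PVE) => pvStep1 d (e, pvPickTag cur nxt b0 (b0 :: bs).length))
        = (fun (d : PVDict) (e : PVE) =>
            d.modify (pvPickTag cur nxt b0 (b0 :: bs).length) [] (fun v => v ++ [pvStrip3 e])) from rfl]
    have hmapfold : (b0 :: bs).foldl (fun (d : PVDict) (e : PVE) =>
          d.modify (pvPickTag cur nxt b0 (b0 :: bs).length) [] (fun v => v ++ [pvStrip3 e])) d
        = ((b0 :: bs).map pvStrip3).foldl (fun (d : PVDict) y =>
            d.modify (pvPickTag cur nxt b0 (b0 :: bs).length) [] (fun v => v ++ [y])) d := by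
      rw [List.foldl_map]
    rw [hmapfold, show (b0 :: bs).map pvStrip3 = pvStrip3 b0 :: bs.map pvStrip3 from rfl,
      pvModifyFold]
    rfl

-- B's sweep is the dict fold over the spec pairs
theorem pvGoBEq :
    ∀ (ms : List PVE) (cur : Option String) (buf : List PVE) (d : PVDict),
    pvGoB d cur buf ms = ((buf ++ ms).zip (pvSpecAsg cur buf ms)).foldl pvStep1 d := by
  intro ms
  induction ms with
  | nil =>
    intro cur buf d
    rw [show pvGoB d cur buf [] = pvFlush d cur buf none from rfl, pvFlushAsFold]
    simp [pvSpecAsg]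
  | cons e ms ih =>
    intro cur buf d
    cases h : pvIsTruthy e.2.2.2 with
    | false =>
      rw [show pvGoB d cur buf (e :: ms) = pvGoB d cur (buf ++ [e]) ms from by simp [pvGoB, h],
        ih, show pvSpecAsg cur buf (e :: ms) = pvSpecAsg cur (buf ++ [e]) ms from by simp [pvSpecAsg, h],
        show buf ++ e :: ms = (buf ++ [e]) ++ ms from by simp]
    | true =>
      rw [show pvGoB d cur buf (e :: ms)
          = pvGoB ((pvFlush d cur buf (some (PySem.Str.replace (e.2.2.2.getD "") ".c" ""))).modify
              (PySem.Str.replace (e.2.2.2.getD "") ".c" "") [] (fun v => v ++ [pvStrip3 e]))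
              (some (PySem.Str.replace (e.2.2.2.getD "") ".c" "")) [] ms from by simp [pvGoB, h],
        ih,
        show pvSpecAsg cur buf (e :: ms)
          = pvFlushTags cur (some (PySem.Str.replace (e.2.2.2.getD "") ".c" "")) buf
            ++ (PySem.Str.replace (e.2.2.2.getD "") ".c" "")
            :: pvSpecAsg (some (PySem.Str.replace (e.2.2.2.getD "") ".c" "")) [] ms
          from by simp [pvSpecAsg, h],
        show buf ++ e :: ms = buf ++ ([e] ++ ms) from rfl,
        List.zip_append (pvLenFlushTags _ _ buf).symm,
        List.foldl_append]
      rw [show ([e] ++ ms).zip ((PySem.Str.replace (e.2.2.2.getD "") ".c" "")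
            :: pvSpecAsg (some (PySem.Str.replace (e.2.2.2.getD "") ".c" "")) [] ms)
          = (e, PySem.Str.replace (e.2.2.2.getD "") ".c" "")
            :: ms.zip (pvSpecAsg (some (PySem.Str.replace (e.2.2.2.getD "") ".c" "")) [] ms) from rfl,
        List.foldl_cons, ← pvFlushAsFold]
      rfl

-- A's dict loop is the dict fold over the spec pairs
theorem pvDictLoopEq :
    ∀ (ms : List PVE) (sl pre : List String) (d : PVDict), sl.length = ms.length →
    (PySem.List.enumerate ms (pre.length : Int)).foldl (fun d p =>
      match PySem.List.pyGetD (((pre ++ sl)).map some) p.1 none with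
      | some mname => d.modify mname [] (fun v => v ++ [pvStrip3 p.2])
      | none => d) d
    = (ms.zip sl).foldl pvStep1 d := by
  intro ms
  induction ms with
  | nil =>
    intro sl pre d h
    have : sl = [] := List.eq_nil_of_length_eq_zero (by simpa using h)
    subst this
    rfl
  | cons e ms ih =>
    intro sl pre d h
    cases sl with
    | nil => simp at h
    | cons s0 sl =>
      rw [PySem.List.enumerate_cons, List.foldl_cons]
      have hget : PySem.List.pyGetD ((pre ++ s0 :: sl).map some) ((pre.length : Nat) : Int) none = some s0 := by
        rw [show (pre ++ s0 :: sl).map some = pre.map some ++ some s0 :: sl.map some from by simp]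
        exact pvGetAt _ _ _ _ _ (by simp)
      simp only [hget]
      rw [show (pre.length : Int) + 1 = (((pre ++ [s0]).length : Nat) : Int) from by simp,
        show pre ++ s0 :: sl = (pre ++ [s0]) ++ sl from by simp,
        ih sl (pre ++ [s0]) _ (by simpa using h)]
      rw [show (e :: ms).zip (s0 :: sl) = (e, s0) :: ms.zip sl from rfl, List.foldl_cons]
      rfl

theorem pvLenSpecAsg : ∀ (ms : List PVE) (cur : Option String) (buf : List PVE),
    (pvSpecAsg cur buf ms).length = buf.length + ms.length := by
  intro ms
  induction ms with
  | nil => intro cur buf; simp [pvSpecAsg, pvLenFlushTags]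
  | cons e ms ih =>
    intro cur buf
    cases h : pvIsTruthy e.2.2.2 with
    | false =>
      rw [show pvSpecAsg cur buf (e :: ms) = pvSpecAsg cur (buf ++ [e]) ms from by simp [pvSpecAsg, h], ih]
      simp; omega
    | true =>
      rw [show pvSpecAsg cur buf (e :: ms)
          = pvFlushTags cur (some (PySem.Str.replace (e.2.2.2.getD "") ".c" "")) buf
            ++ (PySem.Str.replace (e.2.2.2.getD "") ".c" "")
            :: pvSpecAsg (some (PySem.Str.replace (e.2.2.2.getD "") ".c" "")) [] ms
          from by simp [pvSpecAsg, h]]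
      simp [pvLenFlushTags, ih]
      try omega

theorem pvAsg1Eq (ms : List PVE) :
    (pvAbsAnchors 0 ms).foldl
      (fun asg i => PySem.List.pySetD asg i (PySem.List.pyGetD (ms.map pvTagOf) i none))
      (List.replicate ms.length none)
    = ms.map pvTagOf := by
  apply List.ext_getElem?
  intro j
  by_cases hj : j < ms.length
  · rw [pvGetFoldlSet _ _ _ j
      (fun i hi => by rcases (pvMemAbsAnchors ms 0 i).mp hi with ⟨k, hk, rfl, -⟩; omega)
      (by simpa using hj)]
    by_cases hmem : (j : Int) ∈ pvAbsAnchors 0 ms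
    · rw [if_pos hmem, PySem.List.pyGetD_natCast, List.getD_eq_getElem?_getD]
      simp [hj]
    · rw [if_neg hmem]
      have hnt : pvIsTruthy ms[j].2.2.2 = false := by
        by_contra hc
        exact hmem ((pvMemAbsAnchors ms 0 (j : Int)).mpr
          ⟨j, hj, by simp, by simpa using hc⟩)
      simp [hj, pvTagOf, hnt]
  · rw [List.getElem?_eq_none (by rw [pvLenFoldlSet]; simp; omega),
      List.getElem?_eq_none (by simp; omega)]

theorem pvAsg2Bridge (ms : List PVE) (bs : List Int) (asg : List (Option String)) :
    (PySem.List.pyRange 0 ((bs.length : Int) - 1)).foldl (fun s b =>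
      if PySem.List.pyGetD bs b 0 + 1 ≥ PySem.List.pyGetD bs (b + 1) 0 then s
      else (PySem.List.pyRange (PySem.List.pyGetD bs b 0 + 1) (PySem.List.pyGetD bs (b + 1) 0)).foldl
        (fun a i => PySem.List.pySetD a i
          (if PySem.List.pyGetD bs (b + 1) 0 - (PySem.List.pyGetD bs b 0 + 1) ≤ pvMAX_UNTAGGED_RUN then
            if 0 < b ∧ 0 ≤ PySem.List.pyGetD bs b 0 then
              PySem.List.pyGetD s (PySem.List.pyGetD bs b 0) none
            else if PySem.List.pyGetD bs (b + 1) 0 < (ms.length : Int) ∧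
                (PySem.List.pyGetD s (PySem.List.pyGetD bs (b + 1) 0) none).isSome then
              PySem.List.pyGetD s (PySem.List.pyGetD bs (b + 1) 0) none
            else some (makeAddrModule (PySem.List.pyGetD ms (PySem.List.pyGetD bs b 0 + 1) pvDummy).1)
          else some (makeAddrModule (PySem.List.pyGetD ms (PySem.List.pyGetD bs b 0 + 1) pvDummy).1))) s) asg
    = pvPairRec (pvBody ms) 0 bs asg := by
  rw [← pvRangeToPairRec (pvBody ms) bs 0 asg]
  apply PySem.List.foldl_congr_mem
  intro acc b hb
  rw [add_zero]
  rfl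

theorem pvDictLoopEq0 (ms : List PVE) (sl : List String) (d : PVDict) (h : sl.length = ms.length) :
    (PySem.List.enumerate ms 0).foldl (fun d p =>
      match PySem.List.pyGetD (sl.map some) p.1 none with
      | some mname => d.modify mname [] (fun v => v ++ [pvStrip3 p.2])
      | none => d) d
    = (ms.zip sl).foldl pvStep1 d := by
  have h0 := pvDictLoopEq ms sl [] d h
  simpa using h0

-- ===== VERDICT (by name: the statement is the Claim_ definition above) =====
theorem assign_modules_spec : Claim_equal_assign_modules := by
  intro fns hdom
  unfold Spec_assign_modules assign_modules assign_modules_alt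
  clear hdom
  simp only [pvSplitEq fns [] [], List.nil_append]
  set ms := PySem.List.sorted (List.filter (fun f => !pvIsThunk f) fns) (fun f => f.1) with hms
  rw [show (fun f : PVE =>
      if pvIsTruthy f.2.2.2 = true then some (PySem.Str.replace (f.2.2.2.getD "") ".c" "") else none)
      = pvTagOf from rfl]
  rw [pvAnchorsEq ms 0 []]
  simp only [List.nil_append]
  rw [pvAsg1Eq ms]
  rw [show (([-1] ++ pvAbsAnchors 0 ms ++ [(ms.length : Int)] : List Int))
      = ((-1) :: (pvAbsAnchors 0 ms ++ [(ms.length : Int)])) from rfl]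
  rw [pvAsg2Bridge ms ((-1) :: (pvAbsAnchors 0 ms ++ [(ms.length : Int)])) (ms.map pvTagOf)]
  rw [pvStepI ms]
  rw [pvFallbackId ms _ (pvSpecAsg none [] ms)]
  rw [pvDictLoopEq0 ms (pvSpecAsg none [] ms) _ (by simpa using pvLenSpecAsg ms none [])]
  rw [pvGoBEq ms none [], List.nil_append]
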